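-- pv_equiv track=rewrite | github.com/ceyre-boop/trading-stockfish | analytics/replay_full_system.py | _get_session_name
-- ===== SOURCE A (Python) =====
-- def _get_session_name(minute: int) -> str:
--     """Get session name for a given minute."""
--     sessions = {
--         'GLOBEX': (0, 60),
--         'PREMARKET': (60, 120),
--         'RTH_OPEN': (120, 180),
--         'MIDDAY': (180, 300),
--         'POWER_HOUR': (300, 360),
--         'CLOSE': (360, 480),
--     }
--
--     for sname, (start, end) in sessions.items():
--         if start <= minute < end:
--             return sname
--     return 'UNKNOWN'
-- ===== SOURCE B (Python) =====
-- def _get_session_name(minute: int) -> str: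
--     """Get session name for a given minute (binary search over session boundaries)."""
--     boundaries = [0, 60, 120, 180, 300, 360, 480]
--     names = ['UNKNOWN', 'GLOBEX', 'PREMARKET', 'RTH_OPEN',
--              'MIDDAY', 'POWER_HOUR', 'CLOSE', 'UNKNOWN']
--     lo, hi = 0, len(boundaries)
--     while lo < hi:
--         mid = (lo + hi) // 2
--         if minute < boundaries[mid]:
--             hi = mid
--         else:
--             lo = mid + 1
--     return names[lo]
-- ===== Notes on version B (the rewrite author's own statement) =====
-- stated objective: alternative
-- what changed: Replaces the linear scan over a dict of (start,end) intervals with a binary search (bisect_right) over a sorted boundary list indexing a parallel names list.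
import Mathlib
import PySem

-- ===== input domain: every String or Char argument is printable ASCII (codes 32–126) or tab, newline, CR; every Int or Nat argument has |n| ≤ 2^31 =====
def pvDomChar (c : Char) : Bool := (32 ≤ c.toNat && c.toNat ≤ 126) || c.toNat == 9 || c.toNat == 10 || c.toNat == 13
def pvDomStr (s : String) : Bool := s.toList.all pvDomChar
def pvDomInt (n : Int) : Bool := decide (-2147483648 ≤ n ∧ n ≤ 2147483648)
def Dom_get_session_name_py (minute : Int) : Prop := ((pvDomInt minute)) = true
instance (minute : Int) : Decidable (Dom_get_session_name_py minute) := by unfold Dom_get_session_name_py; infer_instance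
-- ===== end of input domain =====

-- B replaces A's linear scan of intervals with a binary search over sorted boundaries (alternative algorithm, same result).
-- ===== PORT A =====
-- A iterates over the dict's items in insertion order; ported as the same ordered chain of interval checks.
def get_session_name_py (minute : Int) : String :=
  let sessions : List (String × (Int × Int)) :=
    [("GLOBEX", (0, 60)), ("PREMARKET", (60, 120)), ("RTH_OPEN", (120, 180)),
     ("MIDDAY", (180, 300)), ("POWER_HOUR", (300, 360)), ("CLOSE", (360, 480))]
  (sessions.findSome? (fun p =>
      if p.2.1 ≤ minute ∧ minute < p.2.2 then some p.1 else none)).getD "UNKNOWN"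

-- ===== PORT B =====
-- the while-loop of Source B: binary search (bisect_right) on [lo, hi)
def pvBisect (bs : List Int) (x : Int) (lo hi : Nat) : Nat :=
  if h : lo < hi then
    let mid := (lo + hi) / 2
    if x < bs.getD mid 0 then pvBisect bs x lo mid else pvBisect bs x (mid + 1) hi
  else lo
termination_by hi - lo
decreasing_by all_goals omega

def get_session_name_py_alt (minute : Int) : String :=
  let boundaries : List Int := [0, 60, 120, 180, 300, 360, 480]
  let names : List String := ["UNKNOWN", "GLOBEX", "PREMARKET", "RTH_OPEN",
                              "MIDDAY", "POWER_HOUR", "CLOSE", "UNKNOWN"]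
  names.getD (pvBisect boundaries minute 0 boundaries.length) "UNKNOWN"

-- ===== PRECONDITION & SPEC =====
def Spec_get_session_name_py (minute : Int) (out : String) : Prop := out = get_session_name_py_alt minute
instance (minute : Int) (out : String) : Decidable (Spec_get_session_name_py minute out) := by unfold Spec_get_session_name_py; infer_instance

-- ===== CLAIM (what is proved, stated in full; the proofs are below) =====
def Claim_equal_get_session_name_py : Prop := ∀ (minute : Int), Dom_get_session_name_py minute → Spec_get_session_name_py minute (get_session_name_py minute)

-- ===== LEMMAS AND PROOFS =====

theorem pvBisect_step (bs : List Int) (x : Int) (lo hi : Nat) (h : lo < hi) :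
    pvBisect bs x lo hi =
      if x < bs.getD ((lo + hi) / 2) 0 then pvBisect bs x lo ((lo + hi) / 2)
      else pvBisect bs x ((lo + hi) / 2 + 1) hi := by
  rw [pvBisect]; simp [h]

theorem pvBisect_done (bs : List Int) (x : Int) (lo hi : Nat) (h : ¬ lo < hi) :
    pvBisect bs x lo hi = lo := by
  rw [pvBisect]; simp [h]

-- B reduced to an explicit decision tree (the three levels of the binary search)
theorem alt_tree (m : Int) : get_session_name_py_alt m =
    if m < 180 then
      if m < 60 then (if m < 0 then "UNKNOWN" else "GLOBEX")
      else (if m < 120 then "PREMARKET" else "RTH_OPEN")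
    else
      if m < 360 then (if m < 300 then "MIDDAY" else "POWER_HOUR")
      else (if m < 480 then "CLOSE" else "UNKNOWN") := by
  unfold get_session_name_py_alt
  simp only [List.length_cons, List.length_nil]
  rw [pvBisect_step _ _ 0 7 (by norm_num)]
  norm_num [List.getD]
  rw [pvBisect_step _ _ 0 3 (by norm_num), pvBisect_step _ _ 4 7 (by norm_num)]
  norm_num [List.getD]
  rw [pvBisect_step _ _ 0 1 (by norm_num), pvBisect_step _ _ 2 3 (by norm_num),
      pvBisect_step _ _ 4 5 (by norm_num), pvBisect_step _ _ 6 7 (by norm_num)]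
  norm_num [List.getD]
  rw [pvBisect_done _ _ 0 0 (by norm_num), pvBisect_done _ _ 1 1 (by norm_num),
      pvBisect_done _ _ 2 2 (by norm_num), pvBisect_done _ _ 3 3 (by norm_num),
      pvBisect_done _ _ 4 4 (by norm_num), pvBisect_done _ _ 5 5 (by norm_num),
      pvBisect_done _ _ 6 6 (by norm_num), pvBisect_done _ _ 7 7 (by norm_num)]
  split_ifs <;> rfl


-- ===== VERDICT =====
set_option maxHeartbeats 1000000 in
theorem get_session_name_py_spec : Claim_equal_get_session_name_py := by
  intro minute _
  unfold Spec_get_session_name_py get_session_name_py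
  rw [alt_tree]
  simp only [List.findSome?_cons, List.findSome?_nil]
  split_ifs <;> first | rfl | omega
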